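-- pv_equiv track=rewrite | github.com/gabsbarreto/TranslaTHOR | backend/app/services/translator_mlx.py | _join_paragraph_lines
-- ===== SOURCE A (Python) =====
-- def _join_paragraph_lines(lines: list[str]) -> str:
--     text = ""
--     for raw_line in lines:
--         line = raw_line.strip()
--         if not line:
--             continue
--         if not text:
--             text = line
--         elif text.endswith("-"):
--             text = text[:-1] + line
--         else:
--             text += " " + line
--     return " ".join(text.split())
-- ===== SOURCE B (Python) =====
-- def _join_paragraph_lines(lines: list[str]) -> str:
--     cleaned = [s for s in (raw.strip() for raw in lines) if s]
--     out = []
--     i = 0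
--     n = len(cleaned)
--     while i < n:
--         cur = cleaned[i]
--         i += 1
--         while cur.endswith("-") and i < n:
--             cur = cur[:-1] + cleaned[i]
--             i += 1
--         out.append(cur)
--     return " ".join(" ".join(out).split())
-- ===== Notes on version B (the rewrite author's own statement) =====
-- stated objective: alternative
-- what changed: Replaces A's single fold that mutates one growing text string with a two-phase decomposition: a cleaning comprehension, then an index scan whose inner while-loop coalesces hyphen-broken fragments into a list that is space-joined at the end.
import Mathlib
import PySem

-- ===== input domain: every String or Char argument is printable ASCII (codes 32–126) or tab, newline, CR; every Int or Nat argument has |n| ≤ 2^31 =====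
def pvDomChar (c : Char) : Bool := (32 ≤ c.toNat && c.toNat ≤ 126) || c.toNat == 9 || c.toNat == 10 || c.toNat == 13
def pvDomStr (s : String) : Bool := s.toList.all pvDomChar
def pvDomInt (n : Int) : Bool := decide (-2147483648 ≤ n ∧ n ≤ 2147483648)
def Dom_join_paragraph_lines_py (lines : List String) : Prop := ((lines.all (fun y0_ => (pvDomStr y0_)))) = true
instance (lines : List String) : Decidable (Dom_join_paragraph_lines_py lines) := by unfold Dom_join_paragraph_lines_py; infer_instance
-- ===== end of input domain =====

-- B re-derives A's paragraph join by a two-phase decomposition (clean, then coalesce hyphen runs into a fragment list); same cost, alternative structure.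


-- ===== PORT A =====
-- one iteration of A's for-loop over the accumulator `text` (strings handled on the List Char side)
def stepA (text : List Char) (raw_line : String) : List Char :=
  let line := PySem.Chars.strip raw_line.toList
  if line = [] then text
  else if text = [] then line
  else if PySem.Chars.endswith text ['-'] then PySem.Chars.slice text none (some (-1)) ++ line
  else text ++ [' '] ++ line

def join_paragraph_lines_py (lines : List String) : String :=
  let text := lines.foldl stepA []
  String.ofList (PySem.Chars.join [' '] (PySem.Chars.split₀ text))

-- ===== PORT B =====
-- B's cleaning comprehension: stripped, non-empty lines
def cleanB (lines : List String) : List (List Char) :=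
  ((lines.map (fun raw => PySem.Chars.strip raw.toList)).filter (fun s => !s.isEmpty))

-- B's inner while-loop: absorb following fragments while `cur` ends with '-'
def absorbB : List Char → List (List Char) → List Char × List (List Char)
  | cur, [] => (cur, [])
  | cur, r :: rs =>
    if PySem.Chars.endswith cur ['-'] then
      absorbB (PySem.Chars.slice cur none (some (-1)) ++ r) rs
    else (cur, r :: rs)

-- termination bound for mergeB (the inner loop only consumes the remaining list)
theorem absorbB_snd_length_le (cur : List Char) (rs : List (List Char)) :
    (absorbB cur rs).2.length ≤ rs.length := by
  induction rs generalizing cur with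
  | nil => simp [absorbB]
  | cons r rs ih =>
    simp only [absorbB]
    split
    · exact le_trans (ih _) (Nat.le_succ _)
    · simp

-- B's outer while-loop: build the list of merged fragments
def mergeB : List (List Char) → List (List Char)
  | [] => []
  | c :: rest =>
    let p := absorbB c rest
    p.1 :: mergeB p.2
termination_by l => l.length
decreasing_by
  simp only [List.length_cons]
  exact Nat.lt_succ_of_le (absorbB_snd_length_le c rest)

def join_paragraph_lines_py_alt (lines : List String) : String :=
  let out := mergeB (cleanB lines)
  String.ofList (PySem.Chars.join [' '] (PySem.Chars.split₀ (PySem.Chars.join [' '] out)))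

-- ===== PRECONDITION & SPEC =====
def Spec_join_paragraph_lines_py (lines : List String) (out : String) : Prop := out = join_paragraph_lines_py_alt lines
instance (lines : List String) (out : String) : Decidable (Spec_join_paragraph_lines_py lines out) := by unfold Spec_join_paragraph_lines_py; infer_instance

-- ===== CLAIM (what is proved, stated in full; the proofs are below) =====
def Claim_equal_join_paragraph_lines_py : Prop := ∀ (lines : List String), Dom_join_paragraph_lines_py lines → Spec_join_paragraph_lines_py lines (join_paragraph_lines_py lines)

-- ===== LEMMAS AND PROOFS =====

-- A's loop body once the line is known to be non-empty and already stripped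
def step2 (text line : List Char) : List Char :=
  if text = [] then line
  else if PySem.Chars.endswith text ['-'] then PySem.Chars.slice text none (some (-1)) ++ line
  else text ++ [' '] ++ line

theorem foldA_eq_fold_clean (lines : List String) (t : List Char) :
    lines.foldl stepA t = (cleanB lines).foldl step2 t := by
  induction lines generalizing t with
  | nil => simp [cleanB]
  | cons l ls ih =>
    by_cases h : PySem.Chars.strip l.toList = []
    · simp [cleanB, stepA, h] at *
      simpa [h] using ih t
    · simp only [List.foldl_cons, cleanB, List.map_cons, List.filter_cons] at *
      simp [h, stepA, step2, ih]

theorem slice_neg_one (t : List Char) : PySem.Chars.slice t none (some (-1)) = t.dropLast := by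
  simp [pysem]

theorem join_append_singleton (sp : List Char) (ds : List (List Char)) (c : List Char) (h : ds ≠ []) :
    PySem.Chars.join sp (ds ++ [c]) = PySem.Chars.join sp ds ++ sp ++ c := by
  induction ds with
  | nil => exact absurd rfl h
  | cons a ds ih =>
    cases ds with
    | nil => simp [PySem.Chars.join_cons_cons, PySem.Chars.join_singleton]
    | cons b ds' =>
      have ih' := ih (by simp)
      simp only [List.cons_append, PySem.Chars.join_cons_cons] at ih' ⊢
      rw [ih']
      simp

theorem J_ne_nil (ds : List (List Char)) (c : List Char) (h : c ≠ []) :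
    PySem.Chars.join [' '] (ds ++ [c]) ≠ [] := by
  cases ds with
  | nil => simpa [PySem.Chars.join_singleton] using h
  | cons a t =>
    rw [join_append_singleton _ _ _ (by simp)]
    simp

theorem endswith_append (y c : List Char) (h : c ≠ []) :
    PySem.Chars.endswith (y ++ c) ['-'] = PySem.Chars.endswith c ['-'] := by
  have key : (['-'] <:+ (y ++ c)) ↔ (['-'] <:+ c) := by
    constructor
    · rintro ⟨p, hp⟩
      have hg : (y ++ c).getLast? = some '-' := by rw [← hp]; simp
      rw [List.getLast?_append_of_ne_nil y h] at hg
      obtain ⟨l', hl⟩ := List.getLast?_eq_some_iff.mp hg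
      exact ⟨l', by rw [← hl]⟩
    · exact fun hs => hs.trans (List.suffix_append y c)
  rcases Bool.eq_false_or_eq_true (PySem.Chars.endswith c ['-']) with hc | hc <;> rw [hc]
  · rw [PySem.Chars.endswith_iff, key, ← PySem.Chars.endswith_iff]
    exact hc
  · rw [Bool.eq_false_iff, Ne, PySem.Chars.endswith_iff, key, ← PySem.Chars.endswith_iff]
    simp [hc]

theorem J_endswith (ds : List (List Char)) (c : List Char) (h : c ≠ []) :
    PySem.Chars.endswith (PySem.Chars.join [' '] (ds ++ [c])) ['-'] = PySem.Chars.endswith c ['-'] := by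
  cases ds with
  | nil => simp [PySem.Chars.join_singleton]
  | cons a t =>
    rw [join_append_singleton _ _ _ (by simp)]
    exact endswith_append _ _ h

theorem J_dropLast (ds : List (List Char)) (c : List Char) (h : c ≠ []) :
    (PySem.Chars.join [' '] (ds ++ [c])).dropLast = PySem.Chars.join [' '] (ds ++ [c.dropLast]) := by
  cases ds with
  | nil => simp [PySem.Chars.join_singleton]
  | cons a t =>
    rw [join_append_singleton _ _ _ (by simp), join_append_singleton _ _ _ (by simp),
      List.dropLast_append_of_ne_nil h]

theorem J_snoc_append (ds : List (List Char)) (u c : List Char) :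
    PySem.Chars.join [' '] (ds ++ [u]) ++ c = PySem.Chars.join [' '] (ds ++ [u ++ c]) := by
  cases ds with
  | nil => simp [PySem.Chars.join_singleton]
  | cons a t =>
    rw [join_append_singleton _ _ _ (by simp), join_append_singleton _ _ _ (by simp)]
    simp

theorem mergeB_nil : mergeB [] = [] := by
  rw [mergeB]

theorem mergeB_cons (c : List Char) (rest : List (List Char)) :
    mergeB (c :: rest) = (absorbB c rest).1 :: mergeB (absorbB c rest).2 := by
  rw [mergeB]

theorem fold_merge (cs : List (List Char)) (ds : List (List Char)) (cur : List Char)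
    (hcur : cur ≠ []) (hcs : ∀ x ∈ cs, x ≠ []) :
    cs.foldl step2 (PySem.Chars.join [' '] (ds ++ [cur])) =
      PySem.Chars.join [' '] (ds ++ mergeB (cur :: cs)) := by
  induction cs generalizing ds cur with
  | nil => rw [mergeB_cons]; simp [absorbB, mergeB_nil]
  | cons c rest ih =>
    have hc : c ≠ [] := hcs c (by simp)
    have hrest : ∀ x ∈ rest, x ≠ [] := fun x hx => hcs x (by simp [hx])
    rw [List.foldl_cons]
    have hne := J_ne_nil ds cur hcur
    rcases Bool.eq_false_or_eq_true (PySem.Chars.endswith cur ['-']) with hE | hE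
    · -- trailing hyphen: merge c into the current fragment
      have hstep : step2 (PySem.Chars.join [' '] (ds ++ [cur])) c =
          PySem.Chars.join [' '] (ds ++ [cur.dropLast ++ c]) := by
        simp only [step2, if_neg hne, J_endswith ds cur hcur, hE]
        rw [if_pos trivial, slice_neg_one, J_dropLast ds cur hcur, J_snoc_append]
      have habs : absorbB cur (c :: rest) = absorbB (cur.dropLast ++ c) rest := by
        simp only [absorbB]
        rw [if_pos hE, slice_neg_one]
      rw [hstep, ih ds (cur.dropLast ++ c) (by simp [hc]) hrest]
      conv_rhs => rw [mergeB_cons]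
      rw [habs]
      conv_lhs => rw [mergeB_cons]
    · -- no trailing hyphen: the current fragment is finished, start a new one
      have hstep : step2 (PySem.Chars.join [' '] (ds ++ [cur])) c =
          PySem.Chars.join [' '] ((ds ++ [cur]) ++ [c]) := by
        rw [join_append_singleton [' '] (ds ++ [cur]) c (by simp)]
        simp only [step2, if_neg hne, J_endswith ds cur hcur, hE, Bool.false_eq_true, if_false]
      have habs : absorbB cur (c :: rest) = (cur, c :: rest) := by
        simp only [absorbB]
        rw [if_neg (by simp [hE])]
      rw [hstep, ih (ds ++ [cur]) c hc hrest]
      conv_rhs => rw [mergeB_cons]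
      rw [habs]
      simp

theorem clean_ne_nil (lines : List String) : ∀ x ∈ cleanB lines, x ≠ [] := by
  intro x hx
  simp only [cleanB, List.mem_filter] at hx
  simpa [List.isEmpty_iff] using hx.2

-- ===== VERDICT (by name: the statement is the Claim_ definition above) =====
theorem join_paragraph_lines_py_spec : Claim_equal_join_paragraph_lines_py := by
  intro lines _
  unfold Spec_join_paragraph_lines_py join_paragraph_lines_py join_paragraph_lines_py_alt
  rw [foldA_eq_fold_clean]
  cases hc : cleanB lines with
  | nil => simp [mergeB_nil]
  | cons c cs =>
    have hne := clean_ne_nil lines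
    rw [hc] at hne
    have h1 : step2 [] c = c := by simp [step2]
    rw [List.foldl_cons, h1]
    have h2 := fold_merge cs [] c (hne c (by simp)) (fun x hx => hne x (by simp [hx]))
    simp only [List.nil_append, PySem.Chars.join_singleton] at h2
    rw [h2]
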